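-- pv_equiv track=rewrite | github.com/sundaramvivek10/FoobarChalleneges | try4.py | sortstates
-- ===== SOURCE A (Python) =====
-- def AbsStates(list):
--     abslist = []
--     for arr in list:
--         if all(state == 0 for state in arr):
--             abslist.append(arr)
--     return abslist
--
-- def nonAbsStates(list):
--     nonabslist = []
--     for arr in list:
--         for state in arr:
--             if state != 0:
--                 nonabslist.append(arr)
--                 break
--     return nonabslist
--
-- def sortstates(list):
--     sortedstates = []
--     absstates = AbsStates(list)
--     for states in absstates:
--         sortedstates.append(states)
--     nonabsstates = nonAbsStates(list)
--     for states in nonabsstates: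
--         sortedstates.append(states)
--     return sortedstates
-- ===== SOURCE B (Python) =====
-- def sortstates(list):
--     return sorted(list, key=lambda arr: any(state != 0 for state in arr))
-- ===== Notes on version B (the rewrite author's own statement) =====
-- stated objective: idiomatic
-- what changed: Replaces the two predicate-filter helper passes and the append loops with a single stable sort keyed on whether the row contains a nonzero entry (all-zero rows key False, sorted first; stability preserves relative order).
import Mathlib
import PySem

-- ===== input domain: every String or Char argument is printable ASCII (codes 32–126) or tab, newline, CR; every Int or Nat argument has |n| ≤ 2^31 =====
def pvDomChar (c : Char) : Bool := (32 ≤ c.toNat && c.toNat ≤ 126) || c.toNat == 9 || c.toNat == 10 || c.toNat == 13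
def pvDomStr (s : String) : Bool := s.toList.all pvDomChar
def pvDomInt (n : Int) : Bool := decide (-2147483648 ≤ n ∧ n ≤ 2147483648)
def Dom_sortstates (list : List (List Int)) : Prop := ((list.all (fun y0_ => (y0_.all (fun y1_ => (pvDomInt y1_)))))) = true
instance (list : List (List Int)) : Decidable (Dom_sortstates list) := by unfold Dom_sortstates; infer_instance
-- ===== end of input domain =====

-- B replaces A's two filter passes (all-zero rows, then nonzero rows) with one stable sort
-- keyed by 'row has a nonzero entry'; objective: idiomatic, same behaviour.

-- ===== PORT A =====
def AbsStates (list : List (List Int)) : List (List Int) :=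
  list.foldl (fun abslist arr =>
    if arr.all (fun state => state == 0) then abslist ++ [arr] else abslist) []

-- inner 'for state in arr: if state != 0: append; break' appends arr once iff some state ≠ 0
def nonAbsStates (list : List (List Int)) : List (List Int) :=
  list.foldl (fun nonabslist arr =>
    if arr.any (fun state => state != 0) then nonabslist ++ [arr] else nonabslist) []

def sortstates (list : List (List Int)) : List (List Int) :=
  let sortedstates : List (List Int) := []
  let absstates := AbsStates list
  let sortedstates := absstates.foldl (fun acc states => acc ++ [states]) sortedstates
  let nonabsstates := nonAbsStates list
  nonabsstates.foldl (fun acc states => acc ++ [states]) sortedstates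

-- ===== PORT B =====
-- sorted(list, key=lambda arr: any(state != 0 for state in arr)); bool key False/True ported as Nat 0/1
def sortstates_alt (list : List (List Int)) : List (List Int) :=
  PySem.List.sorted list (fun arr => if arr.any (fun state => state != 0) then (1 : Nat) else 0) false

-- ===== PRECONDITION & SPEC =====
def Spec_sortstates (list : List (List Int)) (out : List (List Int)) : Prop := out = sortstates_alt list
instance (list : List (List Int)) (out : List (List Int)) : Decidable (Spec_sortstates list out) := by unfold Spec_sortstates; infer_instance

-- ===== CLAIM (what is proved, stated in full; the proofs are below) =====
def Claim_equal_sortstates : Prop := ∀ (list : List (List Int)), Dom_sortstates list → Spec_sortstates list (sortstates list)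

-- ===== LEMMAS AND PROOFS =====

def pvNz (arr : List Int) : Bool := arr.any (fun state => state != 0)

def pvKey (arr : List Int) : Nat := if pvNz arr then 1 else 0

def pvBef (a b : List Int) : Bool := decide (pvKey a < pvKey b)

theorem pvKey_le_one (a : List Int) : pvKey a ≤ 1 := by
  unfold pvKey; split <;> omega

theorem pvIns_zero (x : List Int) (hx : pvNz x = false) :
    ∀ (A B : List (List Int)), (∀ a ∈ A, pvNz a = false) → (∀ b ∈ B, pvNz b = true) →
    PySem.List.insertBy pvBef x (A ++ B) = A ++ x :: B := by
  intro A
  induction A with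
  | nil =>
    intro B _ hB
    cases B with
    | nil => simp [PySem.List.insertBy]
    | cons b B' =>
      have hb : pvNz b = true := hB b (by simp)
      simp [PySem.List.insertBy, pvBef, pvKey, hx, hb]
  | cons a A' ih =>
    intro B hA hB
    have ha : pvNz a = false := hA a (by simp)
    have : pvBef x a = false := by simp [pvBef, pvKey, hx, ha]
    simp [PySem.List.insertBy, this]
    exact ih B (fun a' h => hA a' (by simp [h])) hB

theorem pvIns_one (x : List Int) (hx : pvNz x = true) (L : List (List Int)) :
    PySem.List.insertBy pvBef x L = L ++ [x] := by
  apply PySem.List.insertBy_of_forall_not_before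
  intro y _
  have hy := pvKey_le_one y
  have hx1 : pvKey x = 1 := by simp [pvKey, hx]
  simp only [pvBef, hx1, decide_eq_false_iff_not]
  omega

theorem pvFoldl_ins (xs : List (List Int)) :
    ∀ (A B : List (List Int)), (∀ a ∈ A, pvNz a = false) → (∀ b ∈ B, pvNz b = true) →
    xs.foldl (fun acc x => PySem.List.insertBy pvBef x acc) (A ++ B) =
      (A ++ xs.filter (fun x => !pvNz x)) ++ (B ++ xs.filter pvNz) := by
  induction xs with
  | nil => intro A B _ _; simp
  | cons x xs ih =>
    intro A B hA hB
    by_cases hx : pvNz x = true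
    · have h1 : PySem.List.insertBy pvBef x (A ++ B) = A ++ (B ++ [x]) := by
        rw [pvIns_one x hx, List.append_assoc]
      simp only [List.foldl_cons, h1]
      rw [ih A (B ++ [x]) hA (by intro b hb; rcases List.mem_append.mp hb with h | h
                                 · exact hB b h
                                 · simp at h; simp [h, hx])]
      simp [hx, List.append_assoc]
    · have hx' : pvNz x = false := by simpa using hx
      have h1 : PySem.List.insertBy pvBef x (A ++ B) = (A ++ [x]) ++ B := by
        rw [pvIns_zero x hx' A B hA hB, List.append_assoc]; simp
      simp only [List.foldl_cons, h1]
      rw [ih (A ++ [x]) B (by intro a ha; rcases List.mem_append.mp ha with h | h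
                              · exact hA a h
                              · simp at h; simp [h, hx']) hB]
      simp [hx', List.append_assoc]

theorem sortstates_alt_eq (list : List (List Int)) :
    sortstates_alt list = list.filter (fun x => !pvNz x) ++ list.filter pvNz := by
  have h := pvFoldl_ins list [] [] (by simp) (by simp)
  simp only [List.nil_append] at h
  unfold sortstates_alt
  rw [PySem.List.sorted_eq_foldl_insertBy]
  exact h

theorem sortstates_eq (list : List (List Int)) :
    sortstates list = list.filter (fun x => !pvNz x) ++ list.filter pvNz := by
  unfold sortstates AbsStates nonAbsStates
  simp only
  rw [PySem.List.foldl_append_if_eq_filter, PySem.List.foldl_append_if_eq_filter]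
  rw [show (fun (acc : List (List Int)) (states : List Int) => acc ++ [states]) =
        (fun acc states => acc ++ [states].flatMap (fun s => [s])) from rfl]
  rw [PySem.List.foldl_append_eq_flatMap, PySem.List.foldl_append_eq_flatMap]
  congr 1
  · simp
    apply List.filter_congr
    intro x _
    simp [pvNz, List.all_eq_not_any_not]
    congr 1
  · simp only [List.flatMap_singleton', List.append_nil]
    rfl

-- ===== VERDICT (by name: the statement is the Claim_ definition above) =====
theorem sortstates_spec : Claim_equal_sortstates := by
  intro list _
  unfold Spec_sortstates
  rw [sortstates_alt_eq, sortstates_eq]
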